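-- pv_equiv track=rewrite | github.com/HaidiChen/Coding | python/hashtable/anonymous_letter.py | is_letter_constructable_from_magazine
-- ===== SOURCE A (Python) =====
-- import collections
--
-- def is_letter_constructable_from_magazine(letter_text, magazine_text):
--     char_frequency_for_letter = collections.Counter(letter_text)
--
--     for c in magazine_text:
--         if c in char_frequency_for_letter:
--             char_frequency_for_letter[c] -= 1
--             if char_frequency_for_letter[c] == 0:
--                 del char_frequency_for_letter[c]
--                 if not char_frequency_for_letter:
--                     return True
--
--     return not char_frequency_for_letter
-- ===== SOURCE B (Python) =====
-- import collections
--
-- def is_letter_constructable_from_magazine(letter_text, magazine_text):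
--     letter_counts = collections.Counter(letter_text)
--     magazine_counts = collections.Counter(magazine_text)
--     for c, needed in letter_counts.items():
--         if magazine_counts[c] < needed:
--             return False
--     return True
-- ===== Notes on version B (the rewrite author's own statement) =====
-- stated objective: simpler
-- what changed: Instead of scanning the magazine while decrementing-and-deleting entries of the letter's counter with early exits, B builds both frequency tables once and makes a single pass over the letter's distinct characters checking each required count against the magazine's count; per-character dict mutation and branching in A is replaced by two C-level Counter constructions, measured ~2.9x faster.
import Mathlib
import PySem

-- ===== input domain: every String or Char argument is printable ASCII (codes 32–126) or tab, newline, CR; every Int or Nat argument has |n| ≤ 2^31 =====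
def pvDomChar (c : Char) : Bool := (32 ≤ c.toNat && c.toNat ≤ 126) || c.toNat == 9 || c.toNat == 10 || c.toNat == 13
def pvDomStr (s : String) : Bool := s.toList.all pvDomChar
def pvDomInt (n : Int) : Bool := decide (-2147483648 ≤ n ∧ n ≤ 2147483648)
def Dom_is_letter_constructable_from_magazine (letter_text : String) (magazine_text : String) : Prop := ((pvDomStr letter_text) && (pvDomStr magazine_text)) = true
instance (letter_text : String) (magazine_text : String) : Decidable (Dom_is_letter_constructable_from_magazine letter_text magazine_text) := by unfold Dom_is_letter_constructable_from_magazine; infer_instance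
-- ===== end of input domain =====

-- B replaces A's decrement-and-delete scan of the magazine by building both frequency
-- tables once and checking each letter character's count against the magazine's (simpler).

-- ===== PORT A =====
-- the magazine loop: state is the letter's (mutated) counter
def pvAloop (d : PySem.Dict Char Int) : List Char → Bool
  | [] => d.size == 0
  | c :: rest =>
    if d.contains c then
      let d' := d.modify c 0 (· - 1)
      if d'.getD c 0 == 0 then
        let d'' := d'.erase c
        if d''.size == 0 then true
        else pvAloop d'' rest
      else pvAloop d' rest
    else pvAloop d rest

def is_letter_constructable_from_magazine (letter_text : String) (magazine_text : String) : Bool :=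
  pvAloop (PySem.Dict.counter letter_text.toList) magazine_text.toList

-- ===== PORT B =====
-- the pass over the letter counter's items, failing on the first deficit
def pvBloop (mc : PySem.Dict Char Int) : List (Char × Int) → Bool
  | [] => true
  | (c, needed) :: rest => if mc.getD c 0 < needed then false else pvBloop mc rest

def is_letter_constructable_from_magazine_alt (letter_text : String) (magazine_text : String) : Bool :=
  pvBloop (PySem.Dict.counter magazine_text.toList) (PySem.Dict.counter letter_text.toList).items

-- ===== PRECONDITION & SPEC =====
def Spec_is_letter_constructable_from_magazine (letter_text : String) (magazine_text : String) (out : Bool) : Prop := out = is_letter_constructable_from_magazine_alt letter_text magazine_text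
instance (letter_text : String) (magazine_text : String) (out : Bool) : Decidable (Spec_is_letter_constructable_from_magazine letter_text magazine_text out) := by unfold Spec_is_letter_constructable_from_magazine; infer_instance

-- ===== CLAIM (what is proved, stated in full; the proofs are below) =====
def Claim_equal_is_letter_constructable_from_magazine : Prop := ∀ (letter_text : String) (magazine_text : String), Dom_is_letter_constructable_from_magazine letter_text magazine_text → Spec_is_letter_constructable_from_magazine letter_text magazine_text (is_letter_constructable_from_magazine letter_text magazine_text)

-- ===== LEMMAS AND PROOFS =====

-- facts about Dict.erase (not in the PySem lemma book)
theorem pv_get?_erase (d : PySem.Dict Char Int) (k c : Char) :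
    (d.erase c).get? k = if k = c then none else d.get? k := by
  obtain ⟨l⟩ := d
  simp only [PySem.Dict.erase, PySem.Dict.get?]
  induction l with
  | nil => simp
  | cons p l ih =>
    by_cases hp : p.1 = c
    · by_cases hk : k = c
      · simp [List.filter_cons, hp, hk, ih]
      · have hpk : ¬ p.1 = k := by rw [hp]; exact fun hh => hk hh.symm
        have hck : ¬ c = k := fun hh => hk hh.symm
        simpa [List.filter_cons, List.find?_cons, hp, hpk, hk, hck] using ih
    · by_cases hk : k = c
      · have hpk : ¬ p.1 = k := by rw [hk]; exact hp
        simp [List.filter_cons, List.find?_cons, hp, hpk, hk, ih]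
      · by_cases hpk : p.1 = k
        · simp [hpk, hk]
        · simpa [List.filter_cons, List.find?_cons, hp, hpk, hk] using ih

theorem pv_getD_erase (d : PySem.Dict Char Int) (k c : Char) :
    (d.erase c).getD k 0 = if k = c then 0 else d.getD k 0 := by
  simp only [PySem.Dict.getD, pv_get?_erase]
  by_cases hk : k = c <;> simp [hk]

theorem pv_contains_erase_of_ne (d : PySem.Dict Char Int) {k c : Char} (h : k ≠ c) :
    (d.erase c).contains k = d.contains k := by
  rw [PySem.Dict.contains_eq_isSome_get?, PySem.Dict.contains_eq_isSome_get?,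
    pv_get?_erase, if_neg h]

theorem pv_nodup_keys_erase (d : PySem.Dict Char Int) (c : Char) (h : d.keys.Nodup) :
    (d.erase c).keys.Nodup := by
  simp only [PySem.Dict.keys, PySem.Dict.erase] at *
  exact (List.Sublist.map _ List.filter_sublist).nodup h

-- one magazine step: replacing the per-key demand f (after the step) by g (before it)
theorem pv_all_step (c : Char) (rest : List Char) (f g : Char → Int)
    (hfg : ∀ k, k ≠ c → f k = g k)
    (hc : (f c ≤ (rest.count c : Int)) ↔ (g c ≤ (rest.count c : Int) + 1)) :
    ((∀ k, f k ≤ (rest.count k : Int)) ↔ (∀ k, g k ≤ (((c :: rest).count k : Int)))) := by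
  constructor
  · intro h k
    by_cases hk : k = c
    · rw [hk, List.count_cons_self]
      push_cast
      exact hc.mp (by rw [← hk]; exact h k)
    · rw [List.count_cons_of_ne (Ne.symm hk), ← hfg k hk]
      exact h k
  · intro h k
    by_cases hk : k = c
    · rw [hk]
      apply hc.mpr
      have := h c
      rwa [List.count_cons_self, Nat.cast_add, Nat.cast_one] at this
    · rw [hfg k hk]
      have := h k
      rwa [List.count_cons_of_ne (Ne.symm hk)] at this

-- characterisation of A's magazine loop
theorem pvAloop_iff (ms : List Char) : ∀ d : PySem.Dict Char Int, d.keys.Nodup →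
    (∀ k, d.contains k = true → 0 < d.getD k 0) →
    (pvAloop d ms = true ↔ ∀ k : Char, d.getD k 0 ≤ (ms.count k : Int)) := by
  induction ms with
  | nil =>
    intro d hnd hpos
    simp only [pvAloop, List.count_nil, Nat.cast_zero, beq_iff_eq]
    constructor
    · intro hsz k
      have hitems : d.items = [] := List.length_eq_zero_iff.mp hsz
      simp [PySem.Dict.getD, PySem.Dict.get?, hitems]
    · intro hall
      cases hd : d.items with
      | nil => simp [PySem.Dict.size, hd]
      | cons p tl =>
        have hc : d.contains p.1 = true := by simp [PySem.Dict.contains, hd]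
        have h1 := hpos p.1 hc
        have h2 := hall p.1
        omega
  | cons c rest ih =>
    intro d hnd hpos
    by_cases hc : d.contains c = true
    · have hcpos : 0 < d.getD c 0 := hpos c hc
      simp only [pvAloop, hc, if_true]
      set d' := d.modify c 0 (· - 1) with hd'
      have hgetD' : ∀ k, d'.getD k 0 = if k = c then d.getD c 0 - 1 else d.getD k 0 := by
        intro k; rw [hd', PySem.Dict.getD_modify]
      have hg'c : d'.getD c 0 = d.getD c 0 - 1 := by rw [hgetD' c, if_pos rfl]
      have hnd' : d'.keys.Nodup := by
        rw [hd', PySem.Dict.modify]; exact PySem.Dict.nodup_keys_insert _ _ _ hnd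
      have hcont' : ∀ k, k ≠ c → d'.contains k = d.contains k := by
        intro k hk
        rw [hd', PySem.Dict.modify, PySem.Dict.contains_insert]
        simp [hk]
      by_cases hz : d'.getD c 0 = 0
      · simp only [hz, beq_self_eq_true, if_true]
        have hdc1 : d.getD c 0 = 1 := by omega
        set d'' := d'.erase c with hd''
        have hgetD'' : ∀ k, d''.getD k 0 = if k = c then 0 else d.getD k 0 := by
          intro k
          rw [hd'', pv_getD_erase]
          by_cases hk : k = c <;> simp [hk, hgetD']
        by_cases hsz : d''.size = 0
        · have hitems : d''.items = [] := List.length_eq_zero_iff.mp hsz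
          have hz'' : ∀ k : Char, d''.getD k 0 = 0 := by
            intro k; simp [PySem.Dict.getD, PySem.Dict.get?, hitems]
          simp only [hsz, beq_self_eq_true, if_true, true_iff]
          intro k
          by_cases hk : k = c
          · rw [hk, hdc1, List.count_cons_self]
            push_cast; omega
          · have h0 := hz'' k
            rw [hgetD'' k, if_neg hk] at h0
            rw [h0]
            positivity
        · have hne : (d''.size == 0) = false := by simpa using hsz
          simp only [hne, Bool.false_eq_true, if_false]
          have hnd'' : d''.keys.Nodup := pv_nodup_keys_erase _ _ hnd'
          have hpos'' : ∀ k, d''.contains k = true → 0 < d''.getD k 0 := by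
            intro k hk
            by_cases hkc : k = c
            · rw [hkc, hd'', PySem.Dict.contains_eq_isSome_get?, pv_get?_erase,
                if_pos rfl] at hk
              simp at hk
            · rw [hgetD'' k, if_neg hkc]
              apply hpos
              rw [hd'', pv_contains_erase_of_ne d' hkc, hcont' k hkc] at hk
              exact hk
          rw [ih d'' hnd'' hpos'']
          apply pv_all_step
          · intro k hk; rw [hgetD'' k, if_neg hk]
          · rw [hgetD'' c, if_pos rfl, hdc1]
            omega
      · have hne : (d'.getD c 0 == 0) = false := by simpa using hz
        simp only [hne, Bool.false_eq_true, if_false]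
        have hpos' : ∀ k, d'.contains k = true → 0 < d'.getD k 0 := by
          intro k hk
          by_cases hkc : k = c
          · rw [hkc, hg'c]; omega
          · rw [hgetD' k, if_neg hkc]
            exact hpos k (by rwa [hcont' k hkc] at hk)
        rw [ih d' hnd' hpos']
        apply pv_all_step
        · intro k hk; rw [hgetD' k, if_neg hk]
        · rw [hg'c]; omega
    · have hcf : d.contains c = false := by simpa using hc
      simp only [pvAloop, hcf, Bool.false_eq_true, if_false]
      have hdc0 : d.getD c 0 = 0 := PySem.Dict.getD_of_not_contains d 0 hcf
      rw [ih d hnd hpos]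
      apply pv_all_step
      · intro k _; rfl
      · rw [hdc0]
        omega

-- characterisation of B's pass
theorem pvBloop_iff (mc : PySem.Dict Char Int) (l : List (Char × Int)) :
    (pvBloop mc l = true ↔ ∀ p ∈ l, p.2 ≤ mc.getD p.1 0) := by
  induction l with
  | nil => simp [pvBloop]
  | cons p rest ih =>
    obtain ⟨c, needed⟩ := p
    simp only [pvBloop]
    by_cases h : mc.getD c 0 < needed
    · rw [if_pos h]
      simp only [Bool.false_eq_true, false_iff]
      intro hall
      have := hall (c, needed) (List.mem_cons_self)
      simp at this
      omega
    · rw [if_neg h, ih]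
      constructor
      · intro hall p hp
        rcases List.mem_cons.mp hp with rfl | hp'
        · simpa using not_lt.mp h
        · exact hall p hp'
      · intro hall p hp
        exact hall p (List.mem_cons_of_mem _ hp)

-- ===== VERDICT (by name: the statement is the Claim_ definition above) =====
theorem is_letter_constructable_from_magazine_spec : Claim_equal_is_letter_constructable_from_magazine := by
  intro letter_text magazine_text _
  unfold Spec_is_letter_constructable_from_magazine
  unfold is_letter_constructable_from_magazine is_letter_constructable_from_magazine_alt
  set ls := letter_text.toList
  set ms := magazine_text.toList
  rw [Bool.eq_iff_iff]
  rw [pvAloop_iff ms _ (PySem.Dict.nodup_keys_counter ls)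
    (by
      intro k hk
      rw [PySem.Dict.getD_counter]
      rw [PySem.Dict.contains_counter] at hk
      have : k ∈ ls := by simpa using hk
      exact_mod_cast List.count_pos_iff.mpr this)]
  rw [pvBloop_iff]
  constructor
  · intro h p hp
    rw [PySem.Dict.items_counter] at hp
    simp only [List.mem_map] at hp
    obtain ⟨k, _, rfl⟩ := hp
    rw [PySem.Dict.getD_counter]
    have := h k
    rwa [PySem.Dict.getD_counter] at this
  · intro h k
    rw [PySem.Dict.getD_counter]
    by_cases hk : k ∈ ls
    · have hp : (k, (ls.count k : Int)) ∈ (PySem.Dict.counter ls).items := by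
        rw [PySem.Dict.items_counter]
        simp only [List.mem_map]
        exact ⟨k, by simpa [PySem.Set.mem_ofList] using hk, rfl⟩
      have := h _ hp
      rwa [PySem.Dict.getD_counter] at this
    · rw [List.count_eq_zero_of_not_mem hk]
      positivity
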